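-- pv_equiv track=rewrite | github.com/cdli-gh/mtaac_syntax_pipeline | src/ATF_translit_parser.py | brc_slash_replace
-- ===== SOURCE A (Python) =====
-- def brc_slash_replace(translit):
--   """
--   Replace combinations of slashes and brackets with brackets.
--   """
--   brc_lst = ['(', ')', '{', '}']
--   slash_lst = ['\\', '/']
--   translit_new = ''
--   for t in translit:
--     if translit_new!='':
--       if t in brc_lst and translit_new[-1] in slash_lst:
--         translit_new = translit_new[:-1]+t
--       elif t in slash_lst and translit_new[-1] in brc_lst:
--         pass
--       else:
--         translit_new+=t
--     else:
--       translit_new+=t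
--   return translit_new
-- ===== SOURCE B (Python) =====
-- import re
--
-- def brc_slash_replace(translit):
--   """
--   Replace combinations of slashes and brackets with brackets.
--   """
--   return re.sub(r'[/\\]?([(){}])[/\\]*', r'\1', translit)
-- ===== Notes on version B (the rewrite author's own statement) =====
-- stated objective: idiomatic
-- what changed: Replaced A's stateful character-by-character scan with a buffer and last-character inspection by a single regular-expression substitution that matches each bracket together with at most one slash before it and all slashes after it, keeping only the bracket.
import Mathlib
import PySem

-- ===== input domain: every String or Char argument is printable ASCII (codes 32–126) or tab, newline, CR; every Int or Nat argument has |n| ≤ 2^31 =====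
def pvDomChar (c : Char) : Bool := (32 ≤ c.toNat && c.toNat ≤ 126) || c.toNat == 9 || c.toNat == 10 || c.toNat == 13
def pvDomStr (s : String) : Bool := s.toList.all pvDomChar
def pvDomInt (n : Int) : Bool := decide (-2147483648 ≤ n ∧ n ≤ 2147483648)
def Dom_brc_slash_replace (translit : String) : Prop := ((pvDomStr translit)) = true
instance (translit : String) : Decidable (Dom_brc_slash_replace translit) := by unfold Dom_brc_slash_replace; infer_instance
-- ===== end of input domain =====

-- B replaces A's stateful character-by-character scan by a single regex substitution
-- (re.sub r'[/\\]?([(){}])[/\\]*' -> r'\1'); same return value, more idiomatic.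

-- ===== PORT A =====
-- brackets and slashes, as in A
def pvIsBrc (c : Char) : Bool := ['(', ')', '{', '}'].contains c
def pvIsSlash (c : Char) : Bool := ['\\', '/'].contains c

-- one iteration of A's for-loop; the accumulator translit_new is kept as a REVERSED
-- list of chars, so translit_new[-1] is the head and translit_new[:-1]+t replaces it.
def pvAStep (acc : List Char) (t : Char) : List Char :=
  match acc with
  | [] => [t]                                   -- translit_new == ''
  | h :: rest =>
    if pvIsBrc t && pvIsSlash h then t :: rest  -- translit_new[:-1] + t
    else if pvIsSlash t && pvIsBrc h then acc   -- pass
    else t :: acc                               -- translit_new += t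

def brc_slash_replace (translit : String) : String :=
  String.ofList ((translit.toList.foldl pvAStep []).reverse)

-- ===== PORT B =====
-- hand port of B's regex sub, exact on this pattern: re.sub scans left to right for
-- the leftmost match of `[/\\]?([(){}])[/\\]*` — at most ONE slash before a bracket,
-- then ALL slashes after it — and keeps only the bracket.
def pvBGo : List Char → List Char
  | [] => []
  | c :: rest =>
    if pvIsSlash c then
      match rest with
      | [] => [c]
      | b :: rest2 =>
        if pvIsBrc b then b :: pvBGo (rest2.dropWhile pvIsSlash)
        else c :: pvBGo (b :: rest2)
    else if pvIsBrc c then c :: pvBGo (rest.dropWhile pvIsSlash)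
    else c :: pvBGo rest
termination_by l => l.length
decreasing_by
  · simpa using Nat.lt_succ_of_le (Nat.le_succ_of_le (List.length_dropWhile_le _ _))
  · simp
  · simpa using Nat.lt_succ_of_le (List.length_dropWhile_le _ _)
  · simp

def brc_slash_replace_alt (translit : String) : String :=
  String.ofList (pvBGo translit.toList)

-- ===== PRECONDITION & SPEC =====
def Spec_brc_slash_replace (translit : String) (out : String) : Prop := out = brc_slash_replace_alt translit
instance (translit : String) (out : String) : Decidable (Spec_brc_slash_replace translit out) := by unfold Spec_brc_slash_replace; infer_instance

-- ===== CLAIM (what is proved, stated in full; the proofs are below) =====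
def Claim_equal_brc_slash_replace : Prop := ∀ (translit : String), Dom_brc_slash_replace translit → Spec_brc_slash_replace translit (brc_slash_replace translit)

-- ===== LEMMAS AND PROOFS =====

-- a bracket is never a slash
theorem pv_brc_not_slash (c : Char) (h : pvIsBrc c = true) : pvIsSlash c = false := by
  simp [pvIsBrc] at h
  rcases h with h | h | h | h <;> subst h <;> decide

-- A's step on a nonempty accumulator, as nested ifs
theorem pvAStep_cons (h t : Char) (rest : List Char) :
    pvAStep (h :: rest) t =
      if pvIsBrc t && pvIsSlash h then t :: rest
      else if pvIsSlash t && pvIsBrc h then h :: rest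
      else t :: h :: rest := rfl

-- B consumes each character of its input in one of its branches
theorem pvBGo_cons (c : Char) (rest : List Char) :
    pvBGo (c :: rest) =
      if pvIsSlash c then
        match rest with
        | [] => [c]
        | b :: rest2 =>
          if pvIsBrc b then b :: pvBGo (rest2.dropWhile pvIsSlash)
          else c :: pvBGo (b :: rest2)
      else if pvIsBrc c then c :: pvBGo (rest.dropWhile pvIsSlash)
      else c :: pvBGo rest := by
  rw [pvBGo.eq_def]

-- the key invariant: running A's loop from a nonempty (reversed) accumulator h :: rest
-- produces exactly B's output on h :: l, reversed, on top of rest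
theorem pv_foldl_eq_bgo (l : List Char) :
    ∀ (h : Char) (rest : List Char),
      List.foldl pvAStep (h :: rest) l = (pvBGo (h :: l)).reverse ++ rest := by
  induction l with
  | nil =>
    intro h rest
    by_cases hs : pvIsSlash h = true <;> by_cases hb : pvIsBrc h = true <;>
      simp [pvBGo_cons, hs, hb, pvBGo]
  | cons t l' ih =>
    intro h rest
    rw [List.foldl_cons, pvAStep_cons]
    by_cases h1 : pvIsBrc t = true ∧ pvIsSlash h = true
    · -- bracket after slash: replace last slash
      have hts : pvIsSlash t = false := pv_brc_not_slash t h1.1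
      rw [if_pos (by simp [h1.1, h1.2]), ih t rest]
      congr 1
      rw [pvBGo_cons h, pvBGo_cons t]
      simp [h1.1, h1.2, hts]
    · by_cases h2 : pvIsSlash t = true ∧ pvIsBrc h = true
      · -- slash after bracket: pass
        have hhs : pvIsSlash h = false := pv_brc_not_slash h h2.2
        rw [if_neg (by simp [hhs]), if_pos (by simp [h2.1, h2.2]), ih h rest]
        congr 2
        rw [pvBGo_cons h (t :: l'), pvBGo_cons h l']
        simp [hhs, h2.2, h2.1]
      · -- default: append t
        rw [if_neg (by intro hc; exact h1 (by simpa using hc)),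
            if_neg (by intro hc; exact h2 (by simpa using hc)),
            ih t (h :: rest)]
        have key : pvBGo (h :: t :: l') = h :: pvBGo (t :: l') := by
          by_cases hhs : pvIsSlash h = true
          · have htb : pvIsBrc t = false := by
              by_cases hb : pvIsBrc t = true
              · exact absurd (And.intro hb hhs) h1
              · simpa using hb
            rw [pvBGo_cons h (t :: l')]
            simp [hhs, htb]
          · by_cases hhb : pvIsBrc h = true
            · have hts : pvIsSlash t = false := by
                by_cases hb : pvIsSlash t = true
                · exact absurd (And.intro hb hhb) h2
                · simpa using hb
              rw [pvBGo_cons h (t :: l')]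
              simp [hhs, hhb, hts]
            · rw [pvBGo_cons h (t :: l')]
              simp [hhs, hhb]
        rw [key]
        simp

-- ===== VERDICT (by name: the statement is the Claim_ definition above) =====
theorem brc_slash_replace_spec : Claim_equal_brc_slash_replace := by
  intro translit _
  unfold Spec_brc_slash_replace brc_slash_replace brc_slash_replace_alt
  cases hl : translit.toList with
  | nil => simp [pvBGo]
  | cons c l' =>
    rw [List.foldl_cons]
    have : pvAStep [] c = [c] := rfl
    rw [this, pv_foldl_eq_bgo l' c []]
    simp
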